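-- pv_equiv track=rewrite | github.com/sourav03561/Numerlogy | nameAnalysisGrid.py | categorize_name
-- ===== SOURCE A (Python) =====
-- grid_categories = {
--     "Mental": set("AHJNPGL"),
--     "Physical": set("EWDM"),
--     "Emotional": set("ORIZBSTX"),
--     "Intuitive": set("KFQUYCV"),
-- }
--
-- def categorize_name(name):
--     # Convert name to uppercase to match grid categories
--     name = name.upper()
--     categorized_counts = {"Mental": 0, "Physical": 0, "Emotional": 0, "Intuitive": 0}
--
--     # Categorize each letter in the name
--     for letter in name:
--         for category, letters in grid_categories.items():
--             if letter in letters: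
--                 categorized_counts[category] += 1
--                 break
--
--     return categorized_counts
-- ===== SOURCE B (Python) =====
-- _CATEGORIES = {
--     "Mental": "AHJNPGL",
--     "Physical": "EWDM",
--     "Emotional": "ORIZBSTX",
--     "Intuitive": "KFQUYCV",
-- }
--
-- # inverted index built once: letter -> category
-- _LETTER_TO_CATEGORY = {
--     letter: category
--     for category, letters in _CATEGORIES.items()
--     for letter in letters
-- }
--
-- def categorize_name(name):
--     counts = {"Mental": 0, "Physical": 0, "Emotional": 0, "Intuitive": 0}
--     for letter in name.upper():
--         category = _LETTER_TO_CATEGORY.get(letter)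
--         if category is not None:
--             counts[category] += 1
--     return counts
-- ===== Notes on version B (the rewrite author's own statement) =====
-- stated objective: faster
-- what changed: Replaces the inner scan over the four category sets by a single lookup in an inverted letter-to-category dict built once at module load, so the per-letter work is one dict get instead of a 4-way membership scan.
import Mathlib
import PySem

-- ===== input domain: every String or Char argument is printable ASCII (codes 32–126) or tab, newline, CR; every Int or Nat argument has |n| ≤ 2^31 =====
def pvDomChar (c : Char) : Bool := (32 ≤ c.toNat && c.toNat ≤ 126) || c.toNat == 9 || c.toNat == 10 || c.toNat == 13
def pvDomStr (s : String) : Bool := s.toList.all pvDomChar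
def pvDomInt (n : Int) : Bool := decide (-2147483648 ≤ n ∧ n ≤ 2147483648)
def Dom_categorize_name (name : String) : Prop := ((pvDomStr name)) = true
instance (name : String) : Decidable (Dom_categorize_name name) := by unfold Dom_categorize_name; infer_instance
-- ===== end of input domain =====

-- B replaces A's inner 4-way category-set scan by one lookup per letter in an
-- inverted letter→category dict built once (objective: simpler).

-- ===== PORT A =====
def gridCategories : List (String × PySem.Set Char) :=
  [("Mental", PySem.Set.ofList "AHJNPGL".toList),
   ("Physical", PySem.Set.ofList "EWDM".toList),
   ("Emotional", PySem.Set.ofList "ORIZBSTX".toList),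
   ("Intuitive", PySem.Set.ofList "KFQUYCV".toList)]

-- inner 'for category, letters in grid_categories.items(): … break' loop
def innerScan (letter : Char) (cats : List (String × PySem.Set Char))
    (d : PySem.Dict String Int) : PySem.Dict String Int :=
  match cats with
  | [] => d
  | (category, letters) :: rest =>
      if PySem.Set.contains letters letter then d.modify category 0 (· + 1)
      else innerScan letter rest d

def categorize_name (name : String) : List (String × Int) :=
  ((PySem.Str.upper name).toList.foldl
    (fun d letter => innerScan letter gridCategories d)
    (PySem.Dict.ofList [("Mental", 0), ("Physical", 0), ("Emotional", 0), ("Intuitive", 0)])).items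

-- ===== PORT B =====
def catLetterPairs : List (String × String) :=
  [("Mental", "AHJNPGL"), ("Physical", "EWDM"),
   ("Emotional", "ORIZBSTX"), ("Intuitive", "KFQUYCV")]

-- the dict comprehension building the inverted index, once
def letterToCategory : PySem.Dict Char String :=
  catLetterPairs.foldl
    (fun d p => p.2.toList.foldl (fun d' letter => d'.insert letter p.1) d)
    PySem.Dict.empty

def categorize_name_alt (name : String) : List (String × Int) :=
  ((PySem.Str.upper name).toList.foldl
    (fun d letter =>
      match letterToCategory.get? letter with
      | some category => d.modify category 0 (· + 1)
      | none => d)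
    (PySem.Dict.ofList [("Mental", 0), ("Physical", 0), ("Emotional", 0), ("Intuitive", 0)])).items

-- ===== PRECONDITION & SPEC =====
def Spec_categorize_name (name : String) (out : List (String × Int)) : Prop := out = categorize_name_alt name
instance (name : String) (out : List (String × Int)) : Decidable (Spec_categorize_name name out) := by unfold Spec_categorize_name; infer_instance

-- ===== CLAIM (what is proved, stated in full; the proofs are below) =====
def Claim_equal_categorize_name : Prop := ∀ (name : String), Dom_categorize_name name → Spec_categorize_name name (categorize_name name)

-- ===== LEMMAS AND PROOFS =====

-- the two per-letter step functions agree on every letter and every state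
theorem step_eq (d : PySem.Dict String Int) (c : Char) :
    innerScan c gridCategories d =
      (match letterToCategory.get? c with
       | some category => d.modify category 0 (· + 1)
       | none => d) := by
  by_cases h : c ∈ ['A','H','J','N','P','G','L','E','W','D','M','O','R','I','Z','B','S','T','X','K','F','Q','U','Y','C','V']
  · fin_cases h <;> rfl
  · simp only [List.mem_cons, List.not_mem_nil, or_false, not_or] at h
    obtain ⟨h1,h2,h3,h4,h5,h6,h7,h8,h9,h10,h11,h12,h13,h14,h15,h16,h17,h18,h19,h20,h21,h22,h23,h24,h25,h26⟩ := h
    simp [innerScan, gridCategories, letterToCategory, catLetterPairs,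
      PySem.Set.contains, PySem.Dict.get?, PySem.Dict.insert, PySem.Dict.empty,
      h1,h2,h3,h4,h5,h6,h7,h8,h9,h10,h11,h12,h13,h14,h15,h16,h17,h18,h19,h20,h21,h22,h23,h24,h25,h26]
    rw [List.find?_eq_none.mpr (by rintro ⟨k, v⟩ hx; fin_cases hx <;> simp <;> (intro e; exact absurd e.symm (by assumption)))]
    rfl

-- ===== VERDICT (by name: the statement is the Claim_ definition above) =====
theorem categorize_name_spec : Claim_equal_categorize_name := by
  intro name _
  unfold Spec_categorize_name categorize_name categorize_name_alt
  exact congrArg PySem.Dict.items (PySem.List.foldl_congr_mem _ _ _ _ (fun d c _ => step_eq d c))
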